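-- pv_equiv track=rewrite | github.com/abdrhmn/advent-of-code-2020 | Day6/main.py | part1
-- ===== SOURCE A (Python) =====
-- def part1(data):
--   group = ''
--   groups = []
--
--   for line in data:
--     line = line.strip()
--     if not line:
--       groups.append(group)
--       group = ''
--       continue
--
--     group += line
--
--   groups.append(group)
--
--   sum = 0
--   for group in groups:
--     sum += len("".join(set(group)))
--
--   return sum
-- ===== SOURCE B (Python) =====
-- def part1(data):
--     total = 0
--     seen = set()
--     for line in data:
--         t = line.strip()
--         if t:
--             seen.update(t)
--         else:
--             total += len(seen)
--             seen = set()
--     return total + len(seen)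
-- ===== Notes on version B (the rewrite author's own statement) =====
-- stated objective: simpler
-- what changed: Single pass with a running per-group character set added to the total at each blank line, instead of A's two-phase scheme of string concatenation into a list of group strings followed by a separate distinct-count pass.
import Mathlib
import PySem

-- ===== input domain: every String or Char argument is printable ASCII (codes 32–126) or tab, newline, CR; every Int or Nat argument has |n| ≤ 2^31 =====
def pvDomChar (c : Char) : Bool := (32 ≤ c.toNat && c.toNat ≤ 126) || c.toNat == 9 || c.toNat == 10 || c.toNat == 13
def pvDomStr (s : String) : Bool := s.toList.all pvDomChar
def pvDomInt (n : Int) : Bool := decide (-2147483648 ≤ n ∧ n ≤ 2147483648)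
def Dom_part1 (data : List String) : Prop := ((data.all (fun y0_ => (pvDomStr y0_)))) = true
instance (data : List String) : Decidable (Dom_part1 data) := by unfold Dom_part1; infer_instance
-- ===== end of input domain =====

-- B is a single pass keeping a running per-group set instead of A's group-string list plus second counting pass; return values proved equal.

-- ===== PORT A =====
-- A: accumulate stripped lines into a group string, push it on each blank line and once at the
-- end, then sum len("".join(set(group))) over the groups.  Strings are carried as List Char;
-- len("".join(set(g))) is the number of distinct characters, ported as (PySem.Set.ofList g).length
-- (the join's length does not depend on the set's iteration order).
def part1LoopA (st : List Char × List (List Char)) (line : String) : List Char × List (List Char) :=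
  let line' := PySem.Chars.strip line.toList
  if line' = [] then ([], st.2 ++ [st.1])
  else (st.1 ++ line', st.2)

def part1 (data : List String) : Int :=
  let st := data.foldl part1LoopA ([], [])
  let groups := st.2 ++ [st.1]
  groups.foldl (fun s g => s + ((PySem.Set.ofList g).length : Int)) 0

-- ===== PORT B =====
-- B: one pass; a running PySem.Set of the current group's characters, its size added to the
-- total at each blank line and once at the end.
def part1LoopB (st : Int × PySem.Set Char) (line : String) : Int × PySem.Set Char :=
  let t := PySem.Chars.strip line.toList
  if t = [] then (st.1 + PySem.Set.len st.2, PySem.Set.empty)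
  else (st.1, PySem.Set.update st.2 t)

def part1_alt (data : List String) : Int :=
  let st := data.foldl part1LoopB (0, PySem.Set.empty)
  st.1 + PySem.Set.len st.2

-- ===== PRECONDITION & SPEC =====
def Spec_part1 (data : List String) (out : Int) : Prop := out = part1_alt data
instance (data : List String) (out : Int) : Decidable (Spec_part1 data out) := by unfold Spec_part1; infer_instance

-- ===== CLAIM (what is proved, stated in full; the proofs are below) =====
def Claim_equal_part1 : Prop := ∀ (data : List String), Dom_part1 data → Spec_part1 data (part1 data)

-- ===== LEMMAS AND PROOFS =====

def pvCountSum (gs : List (List Char)) : Int :=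
  gs.foldl (fun s g => s + ((PySem.Set.ofList g).length : Int)) 0

lemma pvCountSum_append_singleton (gs : List (List Char)) (g : List Char) :
    pvCountSum (gs ++ [g]) = pvCountSum gs + ((PySem.Set.ofList g).length : Int) := by
  simp [pvCountSum, List.foldl_append]

lemma part1LoopA_blank {line : String} (st : List Char × List (List Char))
    (h : PySem.Chars.strip line.toList = []) : part1LoopA st line = ([], st.2 ++ [st.1]) := by
  simp [part1LoopA, h]

lemma part1LoopA_nonblank {line : String} (st : List Char × List (List Char))
    (h : ¬ PySem.Chars.strip line.toList = []) :
    part1LoopA st line = (st.1 ++ PySem.Chars.strip line.toList, st.2) := by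
  simp [part1LoopA, h]

lemma part1LoopB_blank {line : String} (st : Int × PySem.Set Char)
    (h : PySem.Chars.strip line.toList = []) :
    part1LoopB st line = (st.1 + PySem.Set.len st.2, PySem.Set.empty) := by
  simp [part1LoopB, h]

lemma part1LoopB_nonblank {line : String} (st : Int × PySem.Set Char)
    (h : ¬ PySem.Chars.strip line.toList = []) :
    part1LoopB st line = (st.1, PySem.Set.update st.2 (PySem.Chars.strip line.toList)) := by
  simp [part1LoopB, h]

-- loop invariant: B's running (total, seen) tracks A's (finished groups, pending group)
lemma pv_inv (data : List String) : ∀ (g : List Char) (gs : List (List Char)),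
    data.foldl part1LoopB (pvCountSum gs, PySem.Set.ofList g) =
      (pvCountSum (data.foldl part1LoopA (g, gs)).2,
       PySem.Set.ofList (data.foldl part1LoopA (g, gs)).1) := by
  induction data with
  | nil => intro g gs; rfl
  | cons line rest ih =>
    intro g gs
    by_cases h : PySem.Chars.strip line.toList = []
    · rw [List.foldl_cons, List.foldl_cons, part1LoopA_blank _ h, part1LoopB_blank _ h]
      have h1 : (pvCountSum gs + PySem.Set.len (PySem.Set.ofList g),
                 (PySem.Set.empty : PySem.Set Char)) =
                (pvCountSum (gs ++ [g]), PySem.Set.ofList []) := by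
        rw [pvCountSum_append_singleton]; rfl
      rw [h1]; exact ih [] (gs ++ [g])
    · rw [List.foldl_cons, List.foldl_cons, part1LoopA_nonblank _ h, part1LoopB_nonblank _ h,
        ← PySem.Set.ofList_append]
      exact ih (g ++ PySem.Chars.strip line.toList) gs

-- ===== VERDICT (by name: the statement is the Claim_ definition above) =====
theorem part1_spec : Claim_equal_part1 := by
  intro data _
  unfold Spec_part1 part1 part1_alt
  have h := pv_inv data [] []
  have h0 : ((0 : Int), (PySem.Set.empty : PySem.Set Char)) = (pvCountSum [], PySem.Set.ofList []) := rfl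
  rw [h0, h]
  have h2 : ∀ (gs : List (List Char)),
      gs.foldl (fun s g => s + ((PySem.Set.ofList g).length : Int)) 0 = pvCountSum gs :=
    fun _ => rfl
  simp only [h2, pvCountSum_append_singleton, PySem.Set.len]
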